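-- pv_equiv track=rewrite | github.com/ASAPP-H/clip2 | evaluate/evaluation.py | calculate_tp
-- ===== SOURCE A (Python) =====
-- def calculate_tp(
--     gold_range, pred_range, gold_range_no_type=None, pred_range_no_type=None
-- ):
--     from collections import Counter
--
--     # out of the ones that have
--     gold_cntr = Counter(gold_range)
--     pred_cntr = Counter(pred_range)
--     gold_intersect_pred = set(gold_range).intersection(pred_range)
--     curr_tp = 0
--     curr_tp_no_type = 0
--     for index in gold_intersect_pred:
--         curr_tp += min(gold_cntr[index], pred_cntr[index])
--     if gold_range_no_type is not None:  # if with tyep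
--         gold_cntr = Counter(gold_range_no_type)
--         pred_cntr = Counter(pred_range_no_type)
--         gold_intersect_pred = set(gold_range_no_type).intersection(pred_range_no_type)
--         for index in gold_intersect_pred:
--             curr_tp_no_type += min(gold_cntr[index], pred_cntr[index])
--     return curr_tp, curr_tp_no_type
-- ===== SOURCE B (Python) =====
-- def calculate_tp(
--     gold_range, pred_range, gold_range_no_type=None, pred_range_no_type=None
-- ):
--     def merge_tp(gold, pred):
--         g = sorted(gold)
--         p = sorted(pred)
--         i = j = tp = 0
--         while i < len(g) and j < len(p):
--             if g[i] == p[j]: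
--                 tp += 1
--                 i += 1
--                 j += 1
--             elif g[i] < p[j]:
--                 i += 1
--             else:
--                 j += 1
--         return tp
--
--     curr_tp = merge_tp(gold_range, pred_range)
--     curr_tp_no_type = 0
--     if gold_range_no_type is not None:
--         curr_tp_no_type = merge_tp(gold_range_no_type, pred_range_no_type)
--     return curr_tp, curr_tp_no_type
-- ===== Notes on version B (the rewrite author's own statement) =====
-- stated objective: alternative
-- what changed: Replaces the Counter/set-intersection accumulation with sorting both lists and a two-cursor merge that counts matched pairs, i.e. the weighted multiset intersection by merging instead of hashing.
import Mathlib
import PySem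

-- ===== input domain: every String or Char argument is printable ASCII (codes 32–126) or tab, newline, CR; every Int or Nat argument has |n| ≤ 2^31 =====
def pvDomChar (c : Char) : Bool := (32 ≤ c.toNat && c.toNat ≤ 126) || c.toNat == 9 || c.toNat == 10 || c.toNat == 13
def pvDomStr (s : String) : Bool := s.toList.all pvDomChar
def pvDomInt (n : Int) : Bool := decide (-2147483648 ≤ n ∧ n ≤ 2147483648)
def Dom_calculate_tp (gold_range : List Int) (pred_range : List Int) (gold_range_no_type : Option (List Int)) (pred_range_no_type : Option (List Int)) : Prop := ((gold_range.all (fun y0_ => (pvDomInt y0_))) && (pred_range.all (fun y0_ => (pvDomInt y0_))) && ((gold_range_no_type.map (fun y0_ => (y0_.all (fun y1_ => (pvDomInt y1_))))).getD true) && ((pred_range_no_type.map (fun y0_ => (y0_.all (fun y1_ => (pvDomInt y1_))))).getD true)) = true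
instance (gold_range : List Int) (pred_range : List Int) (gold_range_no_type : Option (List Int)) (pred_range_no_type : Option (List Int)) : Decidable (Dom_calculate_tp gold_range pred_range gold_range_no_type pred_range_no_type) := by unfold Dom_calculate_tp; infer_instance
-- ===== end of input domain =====

-- B replaces A's Counter/set-intersection accumulation with a sort-and-merge two-cursor count of the weighted multiset intersection (alternative decomposition, similar cost).



-- ===== PORT A =====
-- A: Counter both lists, intersect as sets, sum min counts over the intersection
-- (set iteration order is irrelevant: integer addition is commutative).
def pvTPSum (gold : List Int) (pred : List Int) : Int :=
  let gold_cntr := PySem.Dict.counter gold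
  let pred_cntr := PySem.Dict.counter pred
  let gold_intersect_pred := PySem.Set.inter (PySem.Set.ofList gold) pred
  gold_intersect_pred.foldl
    (fun acc index => acc + min (gold_cntr.getD index 0) (pred_cntr.getD index 0)) 0

def calculate_tp (gold_range : List Int) (pred_range : List Int) (gold_range_no_type : Option (List Int)) (pred_range_no_type : Option (List Int)) : Int × Int :=
  let curr_tp := pvTPSum gold_range pred_range
  match gold_range_no_type, pred_range_no_type with
  | some g2, some p2 => (curr_tp, pvTPSum g2 p2)
  | some _, none => (curr_tp, 0)   -- Python raises TypeError here: excluded by Pre_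
  | none, _ => (curr_tp, 0)

-- ===== PORT B =====
-- B: sort both lists and merge with two cursors, counting equal pairs.
def pvMerge : List Int → List Int → Int
  | [], _ => 0
  | _ :: _, [] => 0
  | a :: g, b :: p =>
    if a = b then pvMerge g p + 1
    else if a < b then pvMerge g (b :: p)
    else pvMerge (a :: g) p

def pvMergeTP (gold : List Int) (pred : List Int) : Int :=
  pvMerge (PySem.List.sorted gold (fun x => x) false) (PySem.List.sorted pred (fun x => x) false)

def calculate_tp_alt (gold_range : List Int) (pred_range : List Int) (gold_range_no_type : Option (List Int)) (pred_range_no_type : Option (List Int)) : Int × Int :=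
  let curr_tp := pvMergeTP gold_range pred_range
  let curr_tp_no_type :=
    match gold_range_no_type, pred_range_no_type with
    | some g2, some p2 => pvMergeTP g2 p2
    | some _, none => 0   -- Python raises TypeError here: excluded by Pre_
    | none, _ => 0
  (curr_tp, curr_tp_no_type)

-- ===== PRECONDITION & SPEC =====
-- Pre_ excludes only the inputs where gold_range_no_type is given but pred_range_no_type
-- is None: there Python A raises TypeError (Counter(None)), and B raises as well (sorted(None)).
def Pre_calculate_tp (gold_range : List Int) (pred_range : List Int) (gold_range_no_type : Option (List Int)) (pred_range_no_type : Option (List Int)) : Prop :=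
  gold_range_no_type.isSome = true → pred_range_no_type.isSome = true
instance (gold_range : List Int) (pred_range : List Int) (gold_range_no_type : Option (List Int)) (pred_range_no_type : Option (List Int)) : Decidable (Pre_calculate_tp gold_range pred_range gold_range_no_type pred_range_no_type) := by unfold Pre_calculate_tp; infer_instance
def pvWitness_calculate_tp : List Int × List Int × Option (List Int) × Option (List Int) :=
  ([1, 2, 2], [2, 2, 3], some [1, 1], some [1, 2])

def Spec_calculate_tp (gold_range : List Int) (pred_range : List Int) (gold_range_no_type : Option (List Int)) (pred_range_no_type : Option (List Int)) (out : Int × Int) : Prop := out = calculate_tp_alt gold_range pred_range gold_range_no_type pred_range_no_type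
instance (gold_range : List Int) (pred_range : List Int) (gold_range_no_type : Option (List Int)) (pred_range_no_type : Option (List Int)) (out : Int × Int) : Decidable (Spec_calculate_tp gold_range pred_range gold_range_no_type pred_range_no_type out) := by unfold Spec_calculate_tp; infer_instance

-- ===== CLAIM (what is proved, stated in full; the proofs are below) =====
def Claim_equal_calculate_tp : Prop := ∀ (gold_range : List Int) (pred_range : List Int) (gold_range_no_type : Option (List Int)) (pred_range_no_type : Option (List Int)), Dom_calculate_tp gold_range pred_range gold_range_no_type pred_range_no_type → Pre_calculate_tp gold_range pred_range gold_range_no_type pred_range_no_type → Spec_calculate_tp gold_range pred_range gold_range_no_type pred_range_no_type (calculate_tp gold_range pred_range gold_range_no_type pred_range_no_type)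

-- ===== LEMMAS AND PROOFS =====

-- ===== VERDICT (by name: the statement is the Claim_ definition above) =====
-- Both sides equal the cardinality of the multiset intersection.
theorem pvMerge_card : ∀ (g p : List Int), g.Pairwise (· ≤ ·) → p.Pairwise (· ≤ ·) →
    pvMerge g p = (((g : Multiset Int) ∩ (p : Multiset Int)).card : Int) := by
  intro g
  induction g with
  | nil => intro p _ _; simp [pvMerge]
  | cons a g ih =>
    intro p hg hp
    induction p with
    | nil => simp [pvMerge]
    | cons b p ihp =>
      by_cases hab : a = b
      · subst hab
        have h1 : ((a :: g : List Int) : Multiset Int) ∩ ((a :: p : List Int) : Multiset Int)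
            = a ::ₘ (((g : List Int) : Multiset Int) ∩ ((p : List Int) : Multiset Int)) := by
          rw [← Multiset.cons_coe a g, ← Multiset.cons_coe a p, Multiset.cons_inter_of_pos _ (by simp)]
          simp
        simp only [pvMerge, h1, Multiset.card_cons]
        rw [ih p hg.of_cons hp.of_cons]
        push_cast; ring
      · by_cases hlt : a < b
        · have hnot : a ∉ ((b :: p : List Int) : Multiset Int) := by
            simp only [Multiset.mem_coe, List.mem_cons]
            rintro (rfl | hmem)
            · exact hab rfl
            · have := (List.pairwise_cons.mp hp).1 a hmem
              omega
          have h1 : ((a :: g : List Int) : Multiset Int) ∩ ((b :: p : List Int) : Multiset Int)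
              = ((g : List Int) : Multiset Int) ∩ ((b :: p : List Int) : Multiset Int) := by
            rw [← Multiset.cons_coe a g, Multiset.cons_inter_of_neg _ hnot]
          simp only [pvMerge, if_neg hab, if_pos hlt, h1]
          exact ih (b :: p) hg.of_cons hp
        · have hgt : b < a := by omega
          have hnot : b ∉ ((a :: g : List Int) : Multiset Int) := by
            simp only [Multiset.mem_coe, List.mem_cons]
            rintro (rfl | hmem)
            · omega
            · have := (List.pairwise_cons.mp hg).1 b hmem
              omega
          have h1 : ((a :: g : List Int) : Multiset Int) ∩ ((b :: p : List Int) : Multiset Int)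
              = ((a :: g : List Int) : Multiset Int) ∩ ((p : List Int) : Multiset Int) := by
            rw [Multiset.inter_comm, ← Multiset.cons_coe b p, Multiset.cons_inter_of_neg _ hnot,
              Multiset.inter_comm]
          simp only [pvMerge, if_neg hab, if_neg hlt, h1]
          exact ihp hp.of_cons

theorem pvMergeTP_eq_card (g p : List Int) :
    pvMergeTP g p = ((((g : Multiset Int)) ∩ (p : Multiset Int)).card : Int) := by
  unfold pvMergeTP
  rw [pvMerge_card _ _ (PySem.List.sorted_pairwise g (fun x => x))
      (PySem.List.sorted_pairwise p (fun x => x))]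
  have h1 : ((PySem.List.sorted g (fun x => x) false : List Int) : Multiset Int) = (g : Multiset Int) :=
    Multiset.coe_eq_coe.mpr (PySem.List.sorted_perm _ _ _)
  have h2 : ((PySem.List.sorted p (fun x => x) false : List Int) : Multiset Int) = (p : Multiset Int) :=
    Multiset.coe_eq_coe.mpr (PySem.List.sorted_perm _ _ _)
  rw [h1, h2]

theorem pvTPSum_eq_card (g p : List Int) :
    pvTPSum g p = ((((g : Multiset Int)) ∩ (p : Multiset Int)).card : Int) := by
  unfold pvTPSum
  simp only [PySem.Dict.getD_counter]
  rw [PySem.List.foldl_add (g := fun x => min ((g.count x : Int)) ((p.count x : Int)))]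
  rw [zero_add]
  -- list sum = Finset sum over the intersection's toFinset
  set L := PySem.Set.inter (PySem.Set.ofList g) p with hL
  have hnodup : L.Nodup := PySem.Set.nodup_inter _ _ (PySem.Set.nodup_ofList g)
  have hmem : ∀ x, x ∈ L ↔ x ∈ (((g : Multiset Int)) ∩ (p : Multiset Int)).toFinset := by
    intro x
    rw [hL, PySem.Set.mem_inter, PySem.Set.mem_ofList, Multiset.mem_toFinset, Multiset.mem_inter]
    simp
  have hF : (⟨(L : Multiset Int), hnodup⟩ : Finset Int) = (((g : Multiset Int)) ∩ (p : Multiset Int)).toFinset := by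
    apply Finset.ext
    intro x
    simpa using hmem x
  have hsum : (L.map (fun x => min ((g.count x : Int)) ((p.count x : Int)))).sum
      = ∑ x ∈ (⟨(L : Multiset Int), hnodup⟩ : Finset Int), min ((g.count x : Int)) ((p.count x : Int)) := by
    rfl
  rw [hsum, hF]
  have : ∀ x, min ((g.count x : Int)) ((p.count x : Int))
      = ((Multiset.count x (((g : Multiset Int)) ∩ (p : Multiset Int)) : Nat) : Int) := by
    intro x
    rw [Multiset.count_inter]
    push_cast
    simp [Multiset.coe_count]
  simp only [this]
  rw [← Nat.cast_sum]
  congr 1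
  exact Multiset.toFinset_sum_count_eq _

theorem calculate_tp_spec : Claim_equal_calculate_tp := by
  intro g p gnt pnt _ _
  unfold Spec_calculate_tp calculate_tp calculate_tp_alt
  cases gnt <;> cases pnt <;>
    simp [pvTPSum_eq_card, pvMergeTP_eq_card]
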